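-- pv_equiv track=rewrite | github.com/jano31415/codejam | kickstart/k2021_f/probb.py | solve_naiv
-- ===== SOURCE A (Python) =====
-- def solve_naiv(d,n,k,events):
--     events.sort(key=lambda x: -x[0])
--     max_h = 0
--     for i in range(1,d+1):
--         tmp=0
--         count = 0
--         for e in events:
--             h,l,r= e
--             if (i >= l) and(r >=i):
--                 tmp+=h
--                 count +=1
--             if count == k:
--                 break
--         if tmp  > max_h:
--             max_h = tmp
--     return max_h
-- ===== SOURCE B (Python) =====
-- def solve_naiv(d, n, k, events):
--     ev = sorted(events, key=lambda x: -x[0])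
--
--     def day_val(i):
--         tmp = 0
--         count = 0
--         for h, l, r in ev:
--             if l <= i and i <= r:
--                 tmp += h
--                 count += 1
--             if count == k:
--                 return tmp
--         return tmp
--
--     if d < 1:
--         return 0
--     cands = [1] \
--         + [l for h, l, r in ev if 1 <= l and l <= d] \
--         + [r + 1 for h, l, r in ev if 1 <= r + 1 and r + 1 <= d]
--     best = 0
--     for c in cands:
--         v = day_val(c)
--         if v > best:
--             best = v
--     return best
-- ===== Notes on version B (the rewrite author's own statement) =====
-- stated objective: faster
-- what changed: Instead of evaluating the covering sum at every day 1..d, B evaluates it only at candidate days where the set of covering intervals can change (day 1, each interval start l, each r+1, clamped to [1,d]), since the per-day value is constant between these boundaries.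
import Mathlib
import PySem

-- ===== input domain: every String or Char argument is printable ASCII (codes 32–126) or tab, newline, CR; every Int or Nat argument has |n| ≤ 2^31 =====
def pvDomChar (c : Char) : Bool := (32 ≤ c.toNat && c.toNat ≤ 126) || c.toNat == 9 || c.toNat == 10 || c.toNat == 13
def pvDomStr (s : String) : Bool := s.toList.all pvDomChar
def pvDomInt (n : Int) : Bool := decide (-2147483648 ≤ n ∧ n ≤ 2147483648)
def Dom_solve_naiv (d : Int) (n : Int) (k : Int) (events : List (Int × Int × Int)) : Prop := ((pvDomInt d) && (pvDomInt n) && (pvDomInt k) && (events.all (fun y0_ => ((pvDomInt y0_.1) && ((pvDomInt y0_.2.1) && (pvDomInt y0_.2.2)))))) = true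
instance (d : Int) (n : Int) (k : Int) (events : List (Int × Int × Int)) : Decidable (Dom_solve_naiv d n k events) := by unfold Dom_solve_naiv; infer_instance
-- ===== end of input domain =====

-- B evaluates the per-day sum only at boundary days (1, interval starts l, ends r+1, clamped to [1,d])
-- instead of at every day 1..d: the covering set is constant between boundaries, so the max is the same.
-- NOTE: Python A sorts `events` IN PLACE (caller-visible mutation); B does not. Equivalence here is about the return value.

-- ===== PORT A =====
-- A's inner loop over the sorted events: accumulate (tmp, count) over covering events, break when count == k.
def pvInnerA (k : Int) (i : Int) : List (Int × Int × Int) → Int → Int → Int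
  | [], tmp, _ => tmp
  | e :: es, tmp, count =>
    let tmp' := if i ≥ e.2.1 ∧ e.2.2 ≥ i then tmp + e.1 else tmp
    let count' := if i ≥ e.2.1 ∧ e.2.2 ≥ i then count + 1 else count
    if count' = k then tmp' else pvInnerA k i es tmp' count'

def solve_naiv (d : Int) (n : Int) (k : Int) (events : List (Int × Int × Int)) : Int :=
  let ev := PySem.List.sorted events (key := fun x => -x.1)
  (PySem.List.pyRange 1 (d + 1) 1).foldl
    (fun max_h i =>
      let tmp := pvInnerA k i ev 0 0
      if tmp > max_h then tmp else max_h) 0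

-- ===== PORT B =====
-- B's helper day_val(i): same scan of the sorted list, early return when count reaches k.
def pvDayValGo (k : Int) (i : Int) : List (Int × Int × Int) → Int → Int → Int
  | [], tmp, _ => tmp
  | (h, l, r) :: es, tmp, count =>
    let p := if l ≤ i ∧ i ≤ r then (tmp + h, count + 1) else (tmp, count)
    if p.2 = k then p.1 else pvDayValGo k i es p.1 p.2

def pvDayVal (ev : List (Int × Int × Int)) (k : Int) (i : Int) : Int :=
  pvDayValGo k i ev 0 0

-- the candidate days: [1] plus the clamped starts and the clamped ends+1
def pvCands (d : Int) (ev : List (Int × Int × Int)) : List Int :=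
  [1]
    ++ ev.filterMap (fun e => if 1 ≤ e.2.1 ∧ e.2.1 ≤ d then some e.2.1 else none)
    ++ ev.filterMap (fun e => if 1 ≤ e.2.2 + 1 ∧ e.2.2 + 1 ≤ d then some (e.2.2 + 1) else none)

def solve_naiv_alt (d : Int) (n : Int) (k : Int) (events : List (Int × Int × Int)) : Int :=
  let ev := PySem.List.sorted events (key := fun x => -x.1)
  if d < 1 then 0
  else
    (pvCands d ev).foldl
      (fun best c =>
        let v := pvDayVal ev k c
        if v > best then v else best) 0

-- ===== PRECONDITION & SPEC =====
def Spec_solve_naiv (d : Int) (n : Int) (k : Int) (events : List (Int × Int × Int)) (out : Int) : Prop := out = solve_naiv_alt d n k events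
instance (d : Int) (n : Int) (k : Int) (events : List (Int × Int × Int)) (out : Int) : Decidable (Spec_solve_naiv d n k events out) := by unfold Spec_solve_naiv; infer_instance

-- ===== CLAIM (what is proved, stated in full; the proofs are below) =====
def Claim_equal_solve_naiv : Prop := ∀ (d : Int) (n : Int) (k : Int) (events : List (Int × Int × Int)), Dom_solve_naiv d n k events → Spec_solve_naiv d n k events (solve_naiv d n k events)

-- ===== LEMMAS AND PROOFS =====

-- the two inner loops are the same function
lemma innerA_eq_dayValGo (k i : Int) :
    ∀ (es : List (Int × Int × Int)) (tmp count : Int),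
      pvInnerA k i es tmp count = pvDayValGo k i es tmp count := by
  intro es
  induction es with
  | nil => intro tmp count; rfl
  | cons e es ih =>
    intro tmp count
    obtain ⟨h, l, r⟩ := e
    simp only [pvInnerA, pvDayValGo, ge_iff_le]
    by_cases hc : l ≤ i ∧ i ≤ r
    · simp [hc, ih]
    · simp [hc, ih]

-- the day value depends only on the covering pattern
lemma dayValGo_congr (k i j : Int) :
    ∀ (es : List (Int × Int × Int)),
      (∀ e ∈ es, (e.2.1 ≤ i ∧ i ≤ e.2.2) ↔ (e.2.1 ≤ j ∧ j ≤ e.2.2)) →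
      ∀ (tmp count : Int), pvDayValGo k i es tmp count = pvDayValGo k j es tmp count := by
  intro es
  induction es with
  | nil => intro _ tmp count; rfl
  | cons e es ih =>
    intro hp tmp count
    obtain ⟨h, l, r⟩ := e
    have he := hp (h, l, r) (by simp)
    have hes : ∀ e ∈ es, (e.2.1 ≤ i ∧ i ≤ e.2.2) ↔ (e.2.1 ≤ j ∧ j ≤ e.2.2) := by
      intro e hm; exact hp e (by simp [hm])
    simp only [pvDayValGo]
    by_cases hc : l ≤ i ∧ i ≤ r
    · simp only [if_pos hc, if_pos (he.mp hc)]
      split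
      · rfl
      · exact ih hes _ _
    · simp only [if_neg hc, if_neg (fun hj => hc (he.mpr hj))]
      split
      · rfl
      · exact ih hes _ _

-- foldl-max facts (about the fold shape both ports use)
lemma foldMax_eq_max (F : Int → Int) (L : List Int) :
    ∀ a, L.foldl (fun m i => let v := F i; if v > m then v else m) a
      = L.foldl (fun m i => max m (F i)) a := by
  induction L with
  | nil => intro a; rfl
  | cons x L ih =>
    intro a
    simp only [List.foldl_cons]
    rw [ih]
    congr 1
    by_cases h : F x > a
    · rw [if_pos h, max_eq_right (by omega)]
    · rw [if_neg h, max_eq_left (by omega)]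

lemma le_foldMax (F : Int → Int) (L : List Int) :
    ∀ a, a ≤ L.foldl (fun m i => max m (F i)) a := by
  induction L with
  | nil => intro a; simp
  | cons x L ih =>
    intro a
    simp only [List.foldl_cons]
    exact le_trans (le_max_left a (F x)) (ih _)

lemma mem_le_foldMax (F : Int → Int) (L : List Int) :
    ∀ a, ∀ x ∈ L, F x ≤ L.foldl (fun m i => max m (F i)) a := by
  induction L with
  | nil => intro a x hx; simp at hx
  | cons y L ih =>
    intro a x hx
    simp only [List.foldl_cons]
    rcases List.mem_cons.mp hx with h | h
    · subst h; exact le_trans (le_max_right a (F x)) (le_foldMax F L _)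
    · exact ih _ x h

lemma foldMax_le (F : Int → Int) (L : List Int) :
    ∀ a M, a ≤ M → (∀ x ∈ L, F x ≤ M) → L.foldl (fun m i => max m (F i)) a ≤ M := by
  induction L with
  | nil => intro a M ha _; simpa using ha
  | cons y L ih =>
    intro a M ha hL
    simp only [List.foldl_cons]
    exact ih _ M (max_le ha (hL y (by simp))) (fun x hx => hL x (by simp [hx]))

-- plain foldl max over Int (used for picking the dominating candidate)
lemma le_foldlMaxI (L : List Int) : ∀ a, a ≤ L.foldl max a := by
  induction L with
  | nil => intro a; simp
  | cons x L ih => intro a; exact le_trans (le_max_left a x) (ih _)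

lemma mem_le_foldlMaxI (L : List Int) : ∀ a, ∀ x ∈ L, x ≤ L.foldl max a := by
  induction L with
  | nil => intro a x hx; simp at hx
  | cons y L ih =>
    intro a x hx
    rcases List.mem_cons.mp hx with h | h
    · subst h; exact le_trans (le_max_right a x) (le_foldlMaxI L _)
    · exact ih _ x h

lemma foldlMaxI_le (L : List Int) : ∀ a M, a ≤ M → (∀ x ∈ L, x ≤ M) → L.foldl max a ≤ M := by
  induction L with
  | nil => intro a M ha _; simpa using ha
  | cons y L ih =>
    intro a M ha hL
    exact ih _ M (max_le ha (hL y (by simp))) (fun x hx => hL x (by simp [hx]))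

lemma foldlMaxI_mem (L : List Int) : ∀ a, L.foldl max a = a ∨ L.foldl max a ∈ L := by
  induction L with
  | nil => intro a; left; rfl
  | cons y L ih =>
    intro a
    rcases ih (max a y) with h | h
    · simp only [List.foldl_cons]
      rcases max_choice a y with hm | hm
      · rw [h, hm]; left; rfl
      · rw [h, hm]; right; simp
    · right; simp [h]

-- membership in the candidate list
lemma one_mem_cands (d : Int) (ev : List (Int × Int × Int)) : (1 : Int) ∈ pvCands d ev := by
  simp [pvCands]

lemma cands_mem_range (d : Int) (ev : List (Int × Int × Int)) (hd : ¬ d < 1) :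
    ∀ c ∈ pvCands d ev, 1 ≤ c ∧ c ≤ d := by
  intro c hc
  simp only [pvCands, List.mem_append, List.mem_cons, List.mem_filterMap] at hc
  rcases hc with (h | ⟨e, _, he⟩) | ⟨e, _, he⟩
  · simp at h; omega
  · split at he
    · rename_i hcond; cases he; omega
    · cases he
  · split at he
    · rename_i hcond; cases he; omega
    · cases he

lemma start_mem_cands (d : Int) (ev : List (Int × Int × Int)) (e : Int × Int × Int)
    (he : e ∈ ev) (h1 : 1 ≤ e.2.1) (h2 : e.2.1 ≤ d) : e.2.1 ∈ pvCands d ev := by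
  simp only [pvCands, List.mem_append, List.mem_filterMap]
  left; right
  exact ⟨e, he, by rw [if_pos ⟨h1, h2⟩]⟩

lemma end_mem_cands (d : Int) (ev : List (Int × Int × Int)) (e : Int × Int × Int)
    (he : e ∈ ev) (h1 : 1 ≤ e.2.2 + 1) (h2 : e.2.2 + 1 ≤ d) : e.2.2 + 1 ∈ pvCands d ev := by
  simp only [pvCands, List.mem_append, List.mem_filterMap]
  right
  exact ⟨e, he, by rw [if_pos ⟨h1, h2⟩]⟩

-- for every day i ∈ [1,d] there is a candidate with the same covering pattern
lemma exists_cand_same_pattern (d : Int) (ev : List (Int × Int × Int))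
    (i : Int) (hi1 : 1 ≤ i) (hi2 : i ≤ d) :
    ∃ c ∈ pvCands d ev, ∀ e ∈ ev, (e.2.1 ≤ i ∧ i ≤ e.2.2) ↔ (e.2.1 ≤ c ∧ c ≤ e.2.2) := by
  classical
  set S := (pvCands d ev).filter (fun x => decide (x ≤ i)) with hS
  set c := S.foldl max 1 with hc
  have hSsub : ∀ x ∈ S, x ∈ pvCands d ev ∧ x ≤ i := by
    intro x hx
    have := List.mem_filter.mp hx
    exact ⟨this.1, by simpa using this.2⟩
  have hc1 : 1 ≤ c := le_foldlMaxI S 1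
  have hci : c ≤ i := foldlMaxI_le S 1 i hi1 (fun x hx => (hSsub x hx).2)
  have hcmem : c ∈ pvCands d ev := by
    rcases foldlMaxI_mem S 1 with h | h
    · rw [hc, h]; exact one_mem_cands d ev
    · exact (hSsub c h).1
  have hcmax : ∀ x ∈ pvCands d ev, x ≤ i → x ≤ c := by
    intro x hx hxi
    exact mem_le_foldlMaxI S 1 x (List.mem_filter.mpr ⟨hx, by simpa using hxi⟩)
  refine ⟨c, hcmem, ?_⟩
  intro e he
  constructor
  · rintro ⟨hl, hr⟩
    refine ⟨?_, le_trans hci hr⟩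
    by_cases hl1 : e.2.1 < 1
    · omega
    · exact hcmax e.2.1 (start_mem_cands d ev e he (by omega) (by omega)) hl
  · rintro ⟨hl, hr⟩
    refine ⟨le_trans hl hci, ?_⟩
    by_contra hri
    -- i > e.2.2, so e.2.2 + 1 is a candidate ≤ i, hence ≤ c, contradicting c ≤ e.2.2
    have h1 : e.2.2 + 1 ≤ i := by omega
    by_cases hpos : 1 ≤ e.2.2 + 1
    · have := hcmax (e.2.2 + 1) (end_mem_cands d ev e he hpos (by omega)) h1
      omega
    · omega

-- ===== VERDICT (by name: the statement is the Claim_ definition above) =====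
theorem solve_naiv_spec : Claim_equal_solve_naiv := by
  intro d n k events _
  unfold Spec_solve_naiv solve_naiv solve_naiv_alt
  set ev := PySem.List.sorted events (key := fun x => -x.1) with hev
  set F : Int → Int := pvDayVal ev k with hF
  have hAfold : ∀ (L : List Int) (a : Int),
      L.foldl (fun max_h i => let tmp := pvInnerA k i ev 0 0; if tmp > max_h then tmp else max_h) a
        = L.foldl (fun m i => max m (F i)) a := by
    intro L a
    rw [← foldMax_eq_max F L a]
    have hfe : (fun max_h i => let tmp := pvInnerA k i ev 0 0; if tmp > max_h then tmp else max_h)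
        = (fun m i => let v := F i; if v > m then v else m) := by
      funext m i
      simp only [hF, pvDayVal, innerA_eq_dayValGo]
    rw [hfe]
  have hBfold : ∀ (L : List Int) (a : Int),
      L.foldl (fun best c => let v := pvDayVal ev k c; if v > best then v else best) a
        = L.foldl (fun m i => max m (F i)) a := by
    intro L a
    rw [← foldMax_eq_max F L a]
  by_cases hd : d < 1
  · rw [if_pos hd, PySem.List.pyRange_one_eq_nil (by omega)]
    rfl
  · rw [if_neg hd, hAfold, hBfold]
    apply le_antisymm
    · refine foldMax_le F _ 0 _ (le_foldMax F _ 0) ?_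
      intro i hi
      have hi' := (PySem.List.mem_pyRange_one).mp hi
      obtain ⟨c, hcmem, hpat⟩ := exists_cand_same_pattern d ev i (by omega) (by omega)
      have : F i = F c := by
        simp only [hF, pvDayVal]
        exact dayValGo_congr k i c ev hpat 0 0
      rw [this]
      exact mem_le_foldMax F (pvCands d ev) 0 c hcmem
    · refine foldMax_le F _ 0 _ (le_foldMax F _ 0) ?_
      intro c hc
      have := cands_mem_range d ev hd c hc
      exact mem_le_foldMax F _ 0 c (PySem.List.mem_pyRange_one.mpr (by omega))
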